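-- pv_equiv track=rewrite | github.com/pyapp-kit/PyQlementine | packages/PySide6-Qlementine/scripts/generate_stubs.py | _split_stubs
-- ===== SOURCE A (Python) =====
-- def _split_stubs(content: str) -> tuple[str, str]:
--     """Split a flat .pyi into (__init__.pyi, utils.pyi).
--
--     Classes/enums/imports + ``appStyle`` go to __init__.pyi.
--     All other top-level ``def`` blocks go to utils.pyi.
--     """
--     lines = content.split("\n")
--     init_lines: list[str] = []
--     utils_lines: list[str] = []
--     pending_decorators: list[str] = []
--
--     i = 0
--     while i < len(lines):
--         line = lines[i]
--
--         if line.startswith("@"):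
--             pending_decorators.append(line)
--             i += 1
--         elif line.startswith("def "):
--             block = [line]
--             i += 1
--             while i < len(lines) and lines[i].startswith((" ", "\t")):
--                 block.append(lines[i])
--                 i += 1
--
--             func_name = line.split("(")[0].removeprefix("def ").strip()
--             if func_name == "appStyle":
--                 init_lines.extend(pending_decorators)
--                 init_lines.extend(block)
--             else:
--                 utils_lines.extend(pending_decorators)
--                 utils_lines.extend(block)
--             pending_decorators.clear()
--         else:
--             init_lines.extend(pending_decorators)
--             pending_decorators.clear()
--             init_lines.append(line)
--             i += 1
--
--     # utils.pyi needs the same import header plus re-import of our types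
--     header: list[str] = []
--     for ln in init_lines:
--         if ln.startswith(("import ", "from ", "#", "try:", "    ", "except")):
--             header.append(ln)
--         elif ln.strip() == "" and header:
--             header.append(ln)
--         else:
--             break
--
--     utils_header = "\n".join(header).rstrip() + "\n\nfrom . import *\n\n"
--     init_pyi = "\n".join(init_lines)
--     utils_pyi = utils_header + "\n".join(utils_lines) + "\n"
--
--     init_pyi = init_pyi.rstrip() + "\n\nfrom . import utils as utils\n"
--
--     return init_pyi, utils_pyi
-- ===== SOURCE B (Python) =====
-- def _split_stubs(content):
--     lines = content.split("\n")
--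
--     # Pass 1: group lines into logical units: (is_def, decorators, body_lines)
--     units = []
--     i = 0
--     n = len(lines)
--     while i < n:
--         decs = []
--         while i < n and lines[i].startswith("@"):
--             decs.append(lines[i])
--             i += 1
--         if i == n:
--             break  # trailing decorators with nothing after them are dropped
--         line = lines[i]
--         if line.startswith("def "):
--             j = i + 1
--             while j < n and lines[j].startswith((" ", "\t")):
--                 j += 1
--             units.append((True, decs, lines[i:j]))
--             i = j
--         else:
--             units.append((False, decs, [line]))
--             i += 1
--
--     # Pass 2: classify the units
--     init_lines = []
--     utils_lines = []
--     for is_def, decs, body in units: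
--         if is_def and body[0].split("(")[0].removeprefix("def ").strip() != "appStyle":
--             utils_lines += decs + body
--         else:
--             init_lines += decs + body
--
--     # Header extraction, closed form: first line must be header-like, then
--     # take the run of header-like or blank lines.
--     def headerish(ln):
--         return ln.startswith(("import ", "from ", "#", "try:", "    ", "except"))
--
--     header = []
--     if init_lines and headerish(init_lines[0]):
--         header.append(init_lines[0])
--         for ln in init_lines[1:]:
--             if headerish(ln) or ln.strip() == "":
--                 header.append(ln)
--             else:
--                 break
--
--     utils_header = "\n".join(header).rstrip() + "\n\nfrom . import *\n\n"
--     init_pyi = "\n".join(init_lines).rstrip() + "\n\nfrom . import utils as utils\n"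
--     utils_pyi = utils_header + "\n".join(utils_lines) + "\n"
--     return init_pyi, utils_pyi
-- ===== Notes on version B (the rewrite author's own statement) =====
-- stated objective: alternative
-- what changed: A's single stateful while-loop with a pending-decorators accumulator is replaced by two passes (group lines into decorator/def/other units, then classify units) and its stateful header scan by a closed-form takeWhile.
import Mathlib
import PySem

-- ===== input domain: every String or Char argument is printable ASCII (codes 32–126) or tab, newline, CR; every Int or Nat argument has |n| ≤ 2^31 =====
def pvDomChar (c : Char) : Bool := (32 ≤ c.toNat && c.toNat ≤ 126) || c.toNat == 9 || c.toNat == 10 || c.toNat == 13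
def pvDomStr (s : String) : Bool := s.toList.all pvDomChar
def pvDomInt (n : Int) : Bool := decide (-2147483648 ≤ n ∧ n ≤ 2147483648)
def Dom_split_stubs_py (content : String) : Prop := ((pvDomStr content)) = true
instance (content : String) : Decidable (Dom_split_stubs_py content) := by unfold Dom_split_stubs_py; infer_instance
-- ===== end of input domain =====

-- B restructures A's single stateful while-loop into two passes (group lines into
-- decorator/def/other units, then classify) and replaces A's stateful header scan by a
-- closed-form takeWhile; objective: alternative decomposition, same return values.

-- ===== PORT A =====
-- str.removeprefix ported by hand (exact: drop len(p) chars iff p is a prefix)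
def pvRemovePrefix (s p : String) : String :=
  if PySem.Str.startswith s p then PySem.Str.slice s (some ((PySem.Str.len p : Int))) none else s

-- line.split("(")[0].removeprefix("def ").strip()
def pvFuncName (line : String) : String :=
  PySem.Str.strip (pvRemovePrefix (((PySem.Str.split? line "(").getD []).headD "") "def ")

-- line.startswith((" ", "\t"))
def pvIsInd (l : String) : Bool :=
  PySem.Str.startswith l " " || PySem.Str.startswith l "\t"

-- ln.startswith(("import ", "from ", "#", "try:", "    ", "except"))
def pvIsHeaderish (ln : String) : Bool :=
  PySem.Str.startswith ln "import " || PySem.Str.startswith ln "from " ||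
  PySem.Str.startswith ln "#" || PySem.Str.startswith ln "try:" ||
  PySem.Str.startswith ln "    " || PySem.Str.startswith ln "except"

-- A's main while-loop over (i, init_lines, utils_lines, pending_decorators)
def pvLoopA (lines pending : List String) : List String × List String :=
  match lines with
  | [] => ([], [])
  | line :: rest =>
    if PySem.Str.startswith line "@" then pvLoopA rest (pending ++ [line])
    else if PySem.Str.startswith line "def " then
      let block := line :: rest.takeWhile pvIsInd
      let r := pvLoopA (rest.dropWhile pvIsInd) []
      if pvFuncName line == "appStyle" then (pending ++ block ++ r.1, r.2)
      else (r.1, pending ++ block ++ r.2)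
    else
      let r := pvLoopA rest []
      (pending ++ [line] ++ r.1, r.2)
termination_by lines.length
decreasing_by
  · simp
  · have := List.length_dropWhile_le pvIsInd rest; simp; omega
  · simp

-- A's header for-loop (break = return the accumulator)
def pvHeaderA (lines header : List String) : List String :=
  match lines with
  | [] => header
  | ln :: rest =>
    if pvIsHeaderish ln then pvHeaderA rest (header ++ [ln])
    else if PySem.Str.strip ln == "" && !header.isEmpty then pvHeaderA rest (header ++ [ln])
    else header

def split_stubs_py (content : String) : String × String :=
  let lines := (PySem.Str.split? content "\n").getD []
  let r := pvLoopA lines []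
  let init_lines := r.1
  let utils_lines := r.2
  let header := pvHeaderA init_lines []
  let utils_header := PySem.Str.rstrip (PySem.Str.join "\n" header) ++ "\n\nfrom . import *\n\n"
  let init_pyi := PySem.Str.join "\n" init_lines
  let utils_pyi := utils_header ++ PySem.Str.join "\n" utils_lines ++ "\n"
  let init_pyi2 := PySem.Str.rstrip init_pyi ++ "\n\nfrom . import utils as utils\n"
  (init_pyi2, utils_pyi)

-- ===== PORT B =====
-- B pass 1: group the lines into units (is_def, decorators, body_lines);
-- trailing decorators with nothing after them are dropped.
def pvUnitsB (lines : List String) : List (Bool × List String × List String) :=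
  let decs := lines.takeWhile (fun l => PySem.Str.startswith l "@")
  match h : lines.dropWhile (fun l => PySem.Str.startswith l "@") with
  | [] => []
  | line :: rs =>
    if PySem.Str.startswith line "def " then
      (true, decs, line :: rs.takeWhile pvIsInd) :: pvUnitsB (rs.dropWhile pvIsInd)
    else
      (false, decs, [line]) :: pvUnitsB rs
termination_by lines.length
decreasing_by
  · have h1 := List.length_dropWhile_le (fun l => PySem.Str.startswith l "@") lines
    rw [h] at h1
    have h2 := List.length_dropWhile_le pvIsInd rs
    simp at h1 ⊢; omega
  · have h1 := List.length_dropWhile_le (fun l => PySem.Str.startswith l "@") lines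
    rw [h] at h1
    simp at h1 ⊢; omega

-- B pass 2: classify each unit into init_lines / utils_lines
def pvClassifyB (units : List (Bool × List String × List String)) : List String × List String :=
  match units with
  | [] => ([], [])
  | (isDef, decs, body) :: us =>
    let r := pvClassifyB us
    if isDef && !(pvFuncName (body.headD "") == "appStyle") then (r.1, decs ++ body ++ r.2)
    else (decs ++ body ++ r.1, r.2)

-- B header extraction, closed form
def pvHeaderB (init_lines : List String) : List String :=
  match init_lines with
  | [] => []
  | l0 :: rest =>
    if pvIsHeaderish l0 then
      l0 :: rest.takeWhile (fun ln => pvIsHeaderish ln || PySem.Str.strip ln == "")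
    else []

def split_stubs_py_alt (content : String) : String × String :=
  let r := pvClassifyB (pvUnitsB ((PySem.Str.split? content "\n").getD []))
  let init_lines := r.1
  let utils_lines := r.2
  let utils_header := PySem.Str.rstrip (PySem.Str.join "\n" (pvHeaderB init_lines)) ++ "\n\nfrom . import *\n\n"
  let init_pyi := PySem.Str.rstrip (PySem.Str.join "\n" init_lines) ++ "\n\nfrom . import utils as utils\n"
  (init_pyi, utils_header ++ PySem.Str.join "\n" utils_lines ++ "\n")

-- ===== PRECONDITION & SPEC =====
def Spec_split_stubs_py (content : String) (out : String × String) : Prop := out = split_stubs_py_alt content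
instance (content : String) (out : String × String) : Decidable (Spec_split_stubs_py content out) := by unfold Spec_split_stubs_py; infer_instance

-- ===== CLAIM (what is proved, stated in full; the proofs are below) =====
def Claim_equal_split_stubs_py : Prop := ∀ (content : String), Dom_split_stubs_py content → Spec_split_stubs_py content (split_stubs_py content)

-- ===== LEMMAS AND PROOFS =====

-- prepend pending decorators to the decorator list of the first unit (dropped if no unit)
def pvPrep (pending : List String) (units : List (Bool × List String × List String)) :
    List (Bool × List String × List String) :=
  match units with
  | [] => []
  | (b, decs, body) :: us => (b, pending ++ decs, body) :: us

theorem pvPrep_nil (us : List (Bool × List String × List String)) : pvPrep [] us = us := by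
  cases us with
  | nil => rfl
  | cons u us => obtain ⟨b, decs, body⟩ := u; simp [pvPrep]

theorem pvPrep_prep (p q : List String) (us : List (Bool × List String × List String)) :
    pvPrep p (pvPrep q us) = pvPrep (p ++ q) us := by
  cases us with
  | nil => rfl
  | cons u us => obtain ⟨b, decs, body⟩ := u; simp [pvPrep]

theorem pvUnitsB_elim (lines : List String) :
    pvUnitsB lines =
      match lines.dropWhile (fun l => PySem.Str.startswith l "@") with
      | [] => []
      | line :: rs =>
        if PySem.Str.startswith line "def " = true then
          (true, lines.takeWhile (fun l => PySem.Str.startswith l "@"),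
            line :: rs.takeWhile pvIsInd) :: pvUnitsB (rs.dropWhile pvIsInd)
        else
          (false, lines.takeWhile (fun l => PySem.Str.startswith l "@"), [line]) :: pvUnitsB rs := by
  rw [pvUnitsB]
  split <;> rename_i h <;> rw [h]

theorem pvUnitsB_nil : pvUnitsB [] = [] := by
  rw [pvUnitsB_elim]
  rfl

theorem pvUnitsB_at (line : String) (rest : List String)
    (hA : PySem.Str.startswith line "@" = true) :
    pvUnitsB (line :: rest) = pvPrep [line] (pvUnitsB rest) := by
  have hA' : PySem.Chars.startswith line.toList ['@'] = true := by simpa using hA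
  rw [pvUnitsB_elim, pvUnitsB_elim]
  simp only [List.dropWhile_cons, List.takeWhile_cons, PySem.Str.startswith_eq]
  simp only [show ("@".toList) = ['@'] from rfl, hA', if_true]
  cases hd : rest.dropWhile (fun l => PySem.Chars.startswith l.toList ['@']) with
  | nil => rfl
  | cons l rs =>
    by_cases hD : PySem.Chars.startswith l.toList ['d', 'e', 'f', ' '] = true <;>
      simp [hD, pvPrep]

theorem pvUnitsB_def (line : String) (rest : List String)
    (hA : ¬ PySem.Str.startswith line "@" = true)
    (hD : PySem.Str.startswith line "def " = true) :
    pvUnitsB (line :: rest) =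
      (true, [], line :: rest.takeWhile pvIsInd) :: pvUnitsB (rest.dropWhile pvIsInd) := by
  have hA' : PySem.Chars.startswith line.toList ['@'] = false := by simpa using hA
  have hD' : PySem.Chars.startswith line.toList ['d', 'e', 'f', ' '] = true := by simpa using hD
  rw [pvUnitsB_elim]
  simp only [List.dropWhile_cons, List.takeWhile_cons, PySem.Str.startswith_eq]
  simp [show ("@".toList) = ['@'] from rfl, hA', hD']

theorem pvUnitsB_other (line : String) (rest : List String)
    (hA : ¬ PySem.Str.startswith line "@" = true)
    (hD : ¬ PySem.Str.startswith line "def " = true) :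
    pvUnitsB (line :: rest) = (false, [], [line]) :: pvUnitsB rest := by
  have hA' : PySem.Chars.startswith line.toList ['@'] = false := by simpa using hA
  have hD' : PySem.Chars.startswith line.toList ['d', 'e', 'f', ' '] = false := by simpa using hD
  rw [pvUnitsB_elim]
  simp only [List.dropWhile_cons, List.takeWhile_cons, PySem.Str.startswith_eq]
  simp [show ("@".toList) = ['@'] from rfl, hA', hD']

theorem pvLoopA_aux (n : Nat) : ∀ (lines : List String), lines.length ≤ n →
    ∀ pending, pvLoopA lines pending = pvClassifyB (pvPrep pending (pvUnitsB lines)) := by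
  induction n with
  | zero =>
    intro lines hl pending
    have h0 : lines = [] := by cases lines <;> simp_all
    subst h0
    simp [pvLoopA, pvUnitsB_nil, pvPrep, pvClassifyB]
  | succ n ih =>
    intro lines hl pending
    cases lines with
    | nil => simp [pvLoopA, pvUnitsB_nil, pvPrep, pvClassifyB]
    | cons line rest =>
      simp only [List.length_cons] at hl
      by_cases hA : PySem.Str.startswith line "@" = true
      · rw [pvLoopA]
        simp only [hA, if_true]
        rw [ih rest (by omega) (pending ++ [line]), pvUnitsB_at line rest hA,
            pvPrep_prep]
      · by_cases hD : PySem.Str.startswith line "def " = true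
        · rw [pvLoopA]
          simp only [hA, hD, if_true, if_false, Bool.false_eq_true]
          have hlen : (rest.dropWhile pvIsInd).length ≤ n := by
            have := List.length_dropWhile_le pvIsInd rest; omega
          rw [ih (rest.dropWhile pvIsInd) hlen [], pvPrep_nil,
              pvUnitsB_def line rest hA hD]
          simp only [pvPrep, pvClassifyB, List.headD_cons]
          by_cases hName : pvFuncName line == "appStyle" <;>
            simp [hName, List.append_assoc]
        · rw [pvLoopA]
          simp only [hA, hD, if_false, Bool.false_eq_true]
          rw [ih rest (by omega) [], pvPrep_nil, pvUnitsB_other line rest hA hD]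
          simp [pvPrep, pvClassifyB, pvFuncName, pvRemovePrefix]

theorem pvLoopA_eq_classify (lines pending : List String) :
    pvLoopA lines pending = pvClassifyB (pvPrep pending (pvUnitsB lines)) :=
  pvLoopA_aux lines.length lines le_rfl pending

theorem pvHeaderA_acc (lines : List String) : ∀ acc : List String, acc ≠ [] →
    pvHeaderA lines acc =
      acc ++ lines.takeWhile (fun ln => pvIsHeaderish ln || PySem.Str.strip ln == "") := by
  induction lines with
  | nil => intro acc _; simp [pvHeaderA]
  | cons ln rest ih =>
    intro acc hacc
    rw [pvHeaderA]
    by_cases h1 : pvIsHeaderish ln = true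
    · simp only [h1, if_true, List.takeWhile_cons, Bool.or_eq_true]
      rw [ih (acc ++ [ln]) (by simp)]
      simp [h1]
    · by_cases h2 : (PySem.Str.strip ln == "") = true
      · have hne : (!acc.isEmpty) = true := by
          cases acc <;> simp_all
        simp only [h1, if_false, h2, hne, Bool.and_self, if_true, Bool.false_eq_true]
        rw [ih (acc ++ [ln]) (by simp)]
        simp [h1, h2]
      · simp [h1, h2]

theorem pvHeaderA_eq (lines : List String) : pvHeaderA lines [] = pvHeaderB lines := by
  cases lines with
  | nil => rfl
  | cons l0 rest =>
    rw [pvHeaderA, pvHeaderB]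
    by_cases h1 : pvIsHeaderish l0 = true
    · simp only [h1, if_true]
      rw [pvHeaderA_acc rest ([] ++ [l0]) (by simp)]
      simp
    · simp [h1]

-- ===== VERDICT (by name: the statement is the Claim_ definition above) =====
theorem split_stubs_py_spec : Claim_equal_split_stubs_py := by
  intro content _
  unfold Spec_split_stubs_py split_stubs_py split_stubs_py_alt
  simp only [pvLoopA_eq_classify, pvPrep_nil, pvHeaderA_eq]
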